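-- pv_equiv track=rewrite | github.com/heysami/diregram | verify_nexusmap.py | scan_unclosed_fences
-- ===== SOURCE A (Python) =====
-- from typing import Any, Dict, Iterable, List, Optional, Tuple
--
-- def scan_unclosed_fences(lines: List[str]) -> Optional[int]:
--     in_fence = False
--     start = 0
--     for i, line in enumerate(lines):
--         if line.strip().startswith("```"):
--             if not in_fence:
--                 in_fence = True
--                 start = i + 1
--             else:
--                 in_fence = False
--     return start if in_fence else None
-- ===== SOURCE B (Python) =====
-- def scan_unclosed_fences(lines):
--     idxs = [i for i, line in enumerate(lines) if line.strip().startswith("```")]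
--     if len(idxs) % 2 == 1:
--         return idxs[-1] + 1
--     return None
-- ===== Notes on version B (the rewrite author's own statement) =====
-- stated objective: simpler
-- what changed: Replaces the boolean toggle/reset state machine with one pass collecting fence-line indices, then a parity check: odd count -> last fence index + 1, else None.
import Mathlib
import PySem

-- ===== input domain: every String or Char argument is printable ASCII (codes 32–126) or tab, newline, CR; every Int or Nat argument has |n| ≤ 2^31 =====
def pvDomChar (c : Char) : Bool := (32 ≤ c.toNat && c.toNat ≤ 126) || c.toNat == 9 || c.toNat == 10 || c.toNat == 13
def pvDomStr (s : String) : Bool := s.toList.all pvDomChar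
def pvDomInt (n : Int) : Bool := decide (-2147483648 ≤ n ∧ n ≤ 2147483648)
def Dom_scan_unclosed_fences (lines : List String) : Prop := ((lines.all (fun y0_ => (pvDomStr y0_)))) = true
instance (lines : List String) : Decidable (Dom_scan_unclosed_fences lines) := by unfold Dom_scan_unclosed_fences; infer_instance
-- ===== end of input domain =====

-- B replaces A's toggle/reset state machine with collect-fence-indices + parity + last index (objective: simpler).


-- the shared line predicate: line.strip().startswith("```")
def isFence (line : String) : Bool := PySem.Str.startswith (PySem.Str.strip line) "```"

-- ===== PORT A =====
-- A's for-loop over enumerate(lines) with state (in_fence, start)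
def aLoop : List String → Int → Bool → Int → (Bool × Int)
  | [], _, in_fence, start => (in_fence, start)
  | line :: rest, i, in_fence, start =>
    if isFence line then
      if !in_fence then aLoop rest (i + 1) true (i + 1)
      else aLoop rest (i + 1) false start
    else aLoop rest (i + 1) in_fence start

def scan_unclosed_fences (lines : List String) : Option Int :=
  let (in_fence, start) := aLoop lines 0 false 0
  if in_fence then some start else none

-- ===== PORT B =====
-- the comprehension [i for i, line in enumerate(lines) if line.strip().startswith("```")]
def fenceIdxs : List String → Int → List Int
  | [], _ => []
  | line :: rest, i =>
    if isFence line then i :: fenceIdxs rest (i + 1) else fenceIdxs rest (i + 1)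

def scan_unclosed_fences_alt (lines : List String) : Option Int :=
  let idxs := fenceIdxs lines 0
  if idxs.length % 2 == 1 then
    match PySem.List.pyGet? idxs (-1) with
    | some j => some (j + 1)
    | none => none
  else none

-- ===== PRECONDITION & SPEC =====
def Spec_scan_unclosed_fences (lines : List String) (out : Option Int) : Prop := out = scan_unclosed_fences_alt lines
instance (lines : List String) (out : Option Int) : Decidable (Spec_scan_unclosed_fences lines out) := by unfold Spec_scan_unclosed_fences; infer_instance

-- ===== CLAIM (what is proved, stated in full; the proofs are below) =====
def Claim_equal_scan_unclosed_fences : Prop := ∀ (lines : List String), Dom_scan_unclosed_fences lines → Spec_scan_unclosed_fences lines (scan_unclosed_fences lines)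

-- ===== LEMMAS AND PROOFS =====

-- the value A's final state yields, as a function of the fence-index list, for either toggle state
def stateResult (in_fence : Bool) (start : Int) (F : List Int) : Option Int :=
  if in_fence then
    if F.length % 2 == 0 then some ((F.getLast?.getD (start - 1)) + 1) else none
  else
    if F.length % 2 == 1 then (F.getLast?.map (· + 1)) else none

theorem aLoop_stateResult : ∀ (lines : List String) (i : Int) (b : Bool) (st : Int),
    (let (f, s) := aLoop lines i b st; if f then some s else none)
      = stateResult b st (fenceIdxs lines i) := by
  intro lines
  induction lines with
  | nil =>
    intro i b st
    cases b <;> simp [aLoop, fenceIdxs, stateResult]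
  | cons line rest ih =>
    intro i b st
    by_cases hf : isFence line = true
    · cases b with
      | false =>
        have h := ih (i + 1) true (i + 1)
        simp only [aLoop, fenceIdxs, hf, if_pos, Bool.not_false] at *
        rw [h]
        cases hF : fenceIdxs rest (i + 1) with
        | nil => simp [stateResult]
        | cons a l =>
          simp only [stateResult, List.length_cons, List.getLast?_cons_cons]
          have : ((a :: l) : List Int).getLast? = some ((a :: l).getLast (by simp)) := by
            simp [List.getLast?_eq_some_getLast]
          by_cases hp : (l.length + 1) % 2 == 0
          · simp only [hp, if_true]
            have hodd : ((l.length + 1 + 1) % 2 == 1) = true := by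
              simp at hp ⊢; omega
            simp [hodd, this]
          · simp only [hp]
            have hodd : ((l.length + 1 + 1) % 2 == 1) = false := by
              simp at hp ⊢; omega
            simp [hodd]
      | true =>
        have h := ih (i + 1) false st
        simp only [aLoop, fenceIdxs, hf, if_pos, Bool.not_true, Bool.false_eq_true, reduceIte] at *
        rw [h]
        cases hF : fenceIdxs rest (i + 1) with
        | nil => simp [stateResult]
        | cons a l =>
          simp only [stateResult, List.length_cons, List.getLast?_cons_cons]
          by_cases hp : (l.length + 1) % 2 == 1
          · have heven : ((l.length + 1 + 1) % 2 == 0) = true := by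
              simp at hp ⊢; omega
            simp [hp, heven, List.getLast?_eq_some_getLast]
          · have heven : ((l.length + 1 + 1) % 2 == 0) = false := by
              simp at hp ⊢; omega
            simp [hp, heven]
    · have h := ih (i + 1) b st
      simp only [aLoop, fenceIdxs, hf, if_neg, Bool.false_eq_true, not_false_iff] at *
      exact h

-- ===== VERDICT (by name: the statement is the Claim_ definition above) =====
theorem scan_unclosed_fences_spec : Claim_equal_scan_unclosed_fences := by
  intro lines _
  unfold Spec_scan_unclosed_fences scan_unclosed_fences scan_unclosed_fences_alt
  rw [show (let (f, s) := aLoop lines 0 false 0; if f then some s else none)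
        = stateResult false 0 (fenceIdxs lines 0) from aLoop_stateResult lines 0 false 0]
  cases hF : fenceIdxs lines 0 with
  | nil => simp [stateResult]
  | cons a l =>
    have hg : ((a :: l) : List Int).getLast? = some ((a :: l).getLast (by simp)) := by
      simp [List.getLast?_eq_some_getLast]
    simp only [stateResult, PySem.List.pyGet?_neg_one, hg]
    simp
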